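-- pv_equiv track=rewrite | github.com/10wook/boj | 3408.py | is_non_boring
-- ===== SOURCE A (Python) =====
-- def is_non_boring(l, r, prev, next):
--     # 종료 조건: 구간 길이 1 이하면 무조건 non-boring
--     if l >= r:
--         return True
--
--     i, j = l, r
--     while i <= j:
--         # 왼쪽에서 고유값 중심 찾기
--         if prev[i] < l and next[i] > r:
--             return (
--                 is_non_boring(l, i - 1, prev, next) and
--                 is_non_boring(i + 1, r, prev, next)
--             )
--         # 오른쪽에서 고유값 중심 찾기
--         if prev[j] < l and next[j] > r:
--             return (
--                 is_non_boring(l, j - 1, prev, next) and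
--                 is_non_boring(j + 1, r, prev, next)
--             )
--         i += 1
--         j -= 1
--
--     # 고유값 중심을 못 찾으면 boring
--     return False
-- ===== SOURCE B (Python) =====
-- def is_non_boring(l, r, prev, next):
--     # Different algorithm: the recursive split succeeds iff EVERY subinterval
--     # [a, b] with a < b contains an element unique within it.  For each left
--     # end a, sweep b rightward keeping m = max(next[k]) over k in [a, b] with
--     # prev[k] < a; the subinterval [a, b] has a unique element iff m > b.
--     for a in range(l, r):
--         m = next[a] if prev[a] < a else None
--         for b in range(a + 1, r + 1):
--             if prev[b] < a:
--                 m = next[b] if m is None else max(m, next[b])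
--             if m is None or m <= b:
--                 return False
--     return True
-- ===== Notes on version B (the rewrite author's own statement) =====
-- stated objective: alternative
-- what changed: A's recursive divide-and-conquer (find a unique element, split, recurse) is replaced by the equivalent characterization 'every subinterval [a,b] with a<b contains an element unique within it', computed by a non-recursive double sweep that keeps a running maximum of next[k] over candidates prev[k]<a.
-- outside the precondition, e.g. on is_non_boring(0, 1, [9, 9], []): A returns False, B returns False
import Mathlib
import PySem

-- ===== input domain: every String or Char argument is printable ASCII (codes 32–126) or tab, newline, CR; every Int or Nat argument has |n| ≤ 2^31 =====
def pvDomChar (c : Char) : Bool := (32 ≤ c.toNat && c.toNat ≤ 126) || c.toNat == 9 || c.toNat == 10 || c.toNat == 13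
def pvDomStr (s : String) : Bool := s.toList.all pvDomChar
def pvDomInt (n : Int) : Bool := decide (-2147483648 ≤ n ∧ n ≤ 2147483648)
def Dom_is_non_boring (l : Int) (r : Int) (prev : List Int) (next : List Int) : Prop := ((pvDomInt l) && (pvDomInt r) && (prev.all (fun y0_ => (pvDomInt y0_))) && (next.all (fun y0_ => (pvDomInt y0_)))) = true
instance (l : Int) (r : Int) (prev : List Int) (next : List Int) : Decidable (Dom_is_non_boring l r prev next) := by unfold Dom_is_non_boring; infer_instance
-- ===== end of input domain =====

-- B replaces A's recursive splitting by a different algorithm: a double sweep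
-- checking that every subinterval contains a unique element, with a running
-- prefix-maximum accumulator; equivalence is about the return value.

-- ===== PORT A =====
-- 'prev[k] < l and next[k] > r' with Python's short-circuit; none = IndexError, excluded by Pre_
def condA (l : Int) (r : Int) (prev : List Int) (next : List Int) (k : Int) : Bool :=
  match PySem.List.pyGet? prev k with
  | none => false   -- IndexError in Python; outside Pre_
  | some p =>
    if p < l then
      match PySem.List.pyGet? next k with
      | none => false   -- IndexError in Python; outside Pre_
      | some n => decide (r < n)
    else false

-- the 'while i <= j' loop of A; 'nb' stands for the recursive calls to is_non_boring
def loopA (nb : Int → Int → Bool) (l : Int) (r : Int) (prev : List Int) (next : List Int)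
    (i : Int) (j : Int) : Bool :=
  if i ≤ j then
    if condA l r prev next i then nb l (i - 1) && nb (i + 1) r
    else if condA l r prev next j then nb l (j - 1) && nb (j + 1) r
    else loopA nb l r prev next (i + 1) (j - 1)
  else false
termination_by (j - i + 1).toNat
decreasing_by omega

-- A's recursion, guarded by fuel for totality ((r-l).toNat+1 nesting levels suffice)
def nbA : Nat → Int → Int → List Int → List Int → Bool
  | 0, _, _, _, _ => false   -- fuel exhaustion; unreachable from is_non_boring's initial fuel
  | f + 1, l, r, prev, next =>
    if l ≥ r then true
    else loopA (fun a b => nbA f a b prev next) l r prev next l r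

def is_non_boring (l : Int) (r : Int) (prev : List Int) (next : List Int) : Bool :=
  nbA ((r - l).toNat + 1) l r prev next

-- ===== PORT B =====
-- Source B's update of m at position b: 'if prev[b] < a: m = next[b] if m is None else max(m, next[b])'
def updB (a : Int) (prev : List Int) (next : List Int) (m : Option Int) (b : Int) : Option Int :=
  match PySem.List.pyGet? prev b with
  | none => none   -- IndexError in Python; outside Pre_
  | some p =>
    if p < a then
      match PySem.List.pyGet? next b with
      | none => none   -- IndexError in Python; outside Pre_
      | some n => match m with
                  | none => some n
                  | some m0 => some (max m0 n)
    else m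

-- Source B's inner 'for b in range(a+1, r+1)' sweep with accumulator m
def innerB (a : Int) (r : Int) (prev : List Int) (next : List Int) (b : Int) (m : Option Int) : Bool :=
  if b ≤ r then
    match updB a prev next m b with
    | none => false
    | some m0 => if m0 ≤ b then false else innerB a r prev next (b + 1) (some m0)
  else true
termination_by (r - b + 1).toNat
decreasing_by omega

-- Source B's outer 'for a in range(l, r)' loop
def outerB (r : Int) (prev : List Int) (next : List Int) (a : Int) : Bool :=
  if a < r then
    innerB a r prev next (a + 1) (updB a prev next none a) && outerB r prev next (a + 1)
  else true
termination_by (r - a).toNat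
decreasing_by omega

def is_non_boring_alt (l : Int) (r : Int) (prev : List Int) (next : List Int) : Bool :=
  outerB r prev next l

-- ===== PRECONDITION & SPEC =====
-- Pre_ excludes interval bounds that index outside the arrays, where Python's prev[i]/next[i]
-- raises IndexError (on a few such inputs A still returns thanks to 'and' short-circuiting
-- before the out-of-range next[i]; B behaves identically there on the cited example, but in
-- general either program may raise outside these bounds).
def Pre_is_non_boring (l : Int) (r : Int) (prev : List Int) (next : List Int) : Prop :=
  l ≥ r ∨ (-(min (prev.length : Int) (next.length : Int)) ≤ l ∧ r < min (prev.length : Int) (next.length : Int))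
instance (l : Int) (r : Int) (prev : List Int) (next : List Int) : Decidable (Pre_is_non_boring l r prev next) := by unfold Pre_is_non_boring; infer_instance
def pvWitness_is_non_boring : Int × Int × List Int × List Int := (0, 2, [-1, -1, -1], [3, 3, 3])

def Spec_is_non_boring (l : Int) (r : Int) (prev : List Int) (next : List Int) (out : Bool) : Prop := out = is_non_boring_alt l r prev next
instance (l : Int) (r : Int) (prev : List Int) (next : List Int) (out : Bool) : Decidable (Spec_is_non_boring l r prev next out) := by unfold Spec_is_non_boring; infer_instance

-- ===== CLAIM (what is proved, stated in full; the proofs are below) =====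
def Claim_equal_is_non_boring : Prop := ∀ (l : Int) (r : Int) (prev : List Int) (next : List Int), Dom_is_non_boring l r prev next → Pre_is_non_boring l r prev next → Spec_is_non_boring l r prev next (is_non_boring l r prev next)

-- ===== LEMMAS AND PROOFS =====

-- values at index k (used only under in-range hypotheses)
def pvV (prev : List Int) (k : Int) : Int := (PySem.List.pyGet? prev k).getD 0
def nvV (next : List Int) (k : Int) : Int := (PySem.List.pyGet? next k).getD 0

-- all positions of [l, r] are valid indexes of both arrays
def GoodIdx (prev next : List Int) (l r : Int) : Prop :=
  ∀ k : Int, l ≤ k → k ≤ r →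
    (PySem.List.pyGet? prev k).isSome = true ∧ (PySem.List.pyGet? next k).isSome = true

-- the common specification: every subinterval [a,b] ⊆ [l,r] of length ≥ 2 contains
-- an element unique within it
def AllU (prev next : List Int) (l r : Int) : Prop :=
  ∀ a b : Int, l ≤ a → a < b → b ≤ r →
    ∃ k : Int, a ≤ k ∧ k ≤ b ∧ pvV prev k < a ∧ b < nvV next k

theorem goodIdx_mono (prev next : List Int) (l r l' r' : Int)
    (h : GoodIdx prev next l r) (h1 : l ≤ l') (h2 : r' ≤ r) : GoodIdx prev next l' r' :=
  fun k hk1 hk2 => h k (by omega) (by omega)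

theorem allU_mono (prev next : List Int) (l r l' r' : Int)
    (h : AllU prev next l r) (h1 : l ≤ l') (h2 : r' ≤ r) : AllU prev next l' r' :=
  fun a b ha hab hb => h a b (by omega) hab (by omega)

theorem condA_iff (l r : Int) (prev next : List Int) (k : Int)
    (hp : (PySem.List.pyGet? prev k).isSome = true)
    (hn : (PySem.List.pyGet? next k).isSome = true) :
    condA l r prev next k = true ↔ (pvV prev k < l ∧ r < nvV next k) := by
  obtain ⟨p, hps⟩ := Option.isSome_iff_exists.mp hp
  obtain ⟨n, hns⟩ := Option.isSome_iff_exists.mp hn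
  simp [condA, pvV, nvV, hps, hns]

-- the proof-only scan: the index A's while-loop settles on
def scanA (l : Int) (r : Int) (prev : List Int) (next : List Int) (i : Int) (j : Int) : Option Int :=
  if i ≤ j then
    if condA l r prev next i then some i
    else if condA l r prev next j then some j
    else scanA l r prev next (i + 1) (j - 1)
  else none
termination_by (j - i + 1).toNat
decreasing_by omega

theorem scanA_some (l r : Int) (prev next : List Int) :
    ∀ (i j idx : Int), scanA l r prev next i j = some idx →
      i ≤ idx ∧ idx ≤ j ∧ condA l r prev next idx = true := by
  intro i j
  fun_induction scanA l r prev next i j with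
  | case1 i j hij hc => intro idx h; simp at h; subst h; exact ⟨le_refl _, hij, hc⟩
  | case2 i j hij hc1 hc2 => intro idx h; simp at h; subst h; exact ⟨hij, le_refl _, hc2⟩
  | case3 i j hij hc1 hc2 ih =>
      intro idx h
      have := ih idx h
      exact ⟨by omega, by omega, this.2.2⟩
  | case4 i j hij => intro idx h; simp at h

theorem scanA_none (l r : Int) (prev next : List Int) :
    ∀ (i j : Int), scanA l r prev next i j = none →
      ∀ k, i ≤ k → k ≤ j → condA l r prev next k = false := by
  intro i j
  fun_induction scanA l r prev next i j with
  | case1 i j hij hc => intro h; simp at h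
  | case2 i j hij hc1 hc2 => intro h; simp at h
  | case3 i j hij hc1 hc2 ih =>
      intro h k hk1 hk2
      by_cases hki : k = i
      · subst hki; simpa using hc1
      · by_cases hkj : k = j
        · subst hkj; simpa using hc2
        · exact ih h k (by omega) (by omega)
  | case4 i j hij => intro _ k hk1 hk2; omega

theorem loopA_eq_scan (nb : Int → Int → Bool) (l r : Int) (prev next : List Int) :
    ∀ (i j : Int), loopA nb l r prev next i j =
      (match scanA l r prev next i j with
       | none => false
       | some idx => nb l (idx - 1) && nb (idx + 1) r) := by
  intro i j
  fun_induction loopA nb l r prev next i j with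
  | case1 i j hij hc => rw [scanA, if_pos hij, if_pos hc]
  | case2 i j hij hc1 hc2 => rw [scanA, if_pos hij, if_neg hc1, if_pos hc2]
  | case3 i j hij hc1 hc2 ih => rw [scanA, if_pos hij, if_neg hc1, if_neg hc2]; exact ih
  | case4 i j hij => rw [scanA, if_neg hij]

-- A's recursion computes exactly AllU (with enough fuel, on valid indexes)
theorem nbA_iff (prev next : List Int) :
    ∀ (n f : Nat) (l r : Int), (r - l).toNat < n → (r - l).toNat < f →
      GoodIdx prev next l r →
      (nbA f l r prev next = true ↔ AllU prev next l r) := by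
  intro n
  induction n with
  | zero => intro f l r h; omega
  | succ n ih =>
    intro f l r hn hf hG
    obtain ⟨f', rfl⟩ : ∃ f', f = f' + 1 := ⟨f - 1, by omega⟩
    by_cases hlr : l ≥ r
    · simp only [nbA, if_pos hlr, true_iff]
      intro a b ha hab hb; omega
    · rw [nbA, if_neg hlr, loopA_eq_scan]
      cases hscan : scanA l r prev next l r with
      | none =>
        simp only [Bool.false_eq_true, false_iff]
        intro hU
        obtain ⟨k, hk1, hk2, hkp, hkn⟩ := hU l r (le_refl _) (by omega) (le_refl _)
        have hc := scanA_none l r prev next l r hscan k hk1 hk2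
        obtain ⟨hp, hn'⟩ := hG k hk1 hk2
        have := (condA_iff l r prev next k hp hn').mpr ⟨hkp, hkn⟩
        simp [this] at hc
      | some idx =>
        obtain ⟨hi1, hi2, hcond⟩ := scanA_some l r prev next l r idx hscan
        obtain ⟨hp, hn'⟩ := hG idx hi1 hi2
        obtain ⟨hpl, hnr⟩ := (condA_iff l r prev next idx hp hn').mp hcond
        have ihL := ih f' l (idx - 1) (by omega) (by omega)
          (goodIdx_mono prev next l r l (idx - 1) hG (le_refl _) (by omega))
        have ihR := ih f' (idx + 1) r (by omega) (by omega)
          (goodIdx_mono prev next l r (idx + 1) r hG (by omega) (le_refl _))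
        simp only [Bool.and_eq_true]
        constructor
        · rintro ⟨hL, hR⟩ a b ha hab hb
          by_cases h1 : idx < a
          · exact ihR.mp hR a b (by omega) hab hb
          · by_cases h2 : b < idx
            · exact ihL.mp hL a b ha hab (by omega)
            · exact ⟨idx, by omega, by omega, by omega, by omega⟩
        · intro hU
          exact ⟨ihL.mpr (allU_mono prev next l r l (idx - 1) hU (le_refl _) (by omega)),
                 ihR.mpr (allU_mono prev next l r (idx + 1) r hU (by omega) (le_refl _))⟩

-- invariant of B's accumulator m over the scanned range [a, hi]:
-- m dominates every candidate's next-value, and any value of m is attained by a candidate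
def MInv (prev next : List Int) (a hi : Int) (m : Option Int) : Prop :=
  (∀ k, a ≤ k → k ≤ hi → pvV prev k < a → ∃ m0, m = some m0 ∧ nvV next k ≤ m0) ∧
  (∀ m0, m = some m0 → ∃ k, a ≤ k ∧ k ≤ hi ∧ pvV prev k < a ∧ nvV next k = m0)

theorem updB_inv (prev next : List Int) (a b : Int) (m : Option Int)
    (hp : (PySem.List.pyGet? prev b).isSome = true)
    (hn : (PySem.List.pyGet? next b).isSome = true)
    (hab : a ≤ b)
    (hInv : MInv prev next a (b - 1) m) :
    MInv prev next a b (updB a prev next m b) := by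
  obtain ⟨p, hps⟩ := Option.isSome_iff_exists.mp hp
  obtain ⟨nv, hns⟩ := Option.isSome_iff_exists.mp hn
  have hpv : pvV prev b = p := by simp [pvV, hps]
  have hnv : nvV next b = nv := by simp [nvV, hns]
  obtain ⟨h1, h2⟩ := hInv
  by_cases hpa : p < a
  · cases m with
    | none =>
      have hval : updB a prev next none b = some nv := by simp [updB, hps, hns, hpa]
      rw [hval]
      constructor
      · intro k hk1 hk2 hkc
        refine ⟨nv, rfl, ?_⟩
        by_cases hkb : k = b
        · subst hkb; omega
        · obtain ⟨m0, hm0, _⟩ := h1 k hk1 (by omega) hkc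
          exact absurd hm0 (by simp)
      · intro m0 hm0
        simp at hm0
        exact ⟨b, hab, le_refl _, by omega, by omega⟩
    | some m1 =>
      have hval : updB a prev next (some m1) b = some (max m1 nv) := by
        simp [updB, hps, hns, hpa]
      rw [hval]
      constructor
      · intro k hk1 hk2 hkc
        refine ⟨max m1 nv, rfl, ?_⟩
        by_cases hkb : k = b
        · subst hkb; rw [hnv]; exact le_max_right _ _
        · obtain ⟨m0, hm0, hle⟩ := h1 k hk1 (by omega) hkc
          simp at hm0; subst hm0
          exact le_trans hle (le_max_left _ _)
      · intro m0 hm0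
        simp at hm0; subst hm0
        rcases le_total nv m1 with h | h
        · obtain ⟨k, hk1, hk2, hkc, hke⟩ := h2 m1 rfl
          exact ⟨k, hk1, by omega, hkc, by omega⟩
        · exact ⟨b, hab, le_refl _, by omega, by omega⟩
  · have hval : updB a prev next m b = m := by simp [updB, hps, hpa]
    rw [hval]
    constructor
    · intro k hk1 hk2 hkc
      by_cases hkb : k = b
      · subst hkb; omega
      · exact h1 k hk1 (by omega) hkc
    · intro m0 hm0
      obtain ⟨k, hk1, hk2, hkc, hke⟩ := h2 m0 hm0
      exact ⟨k, hk1, by omega, hkc, hke⟩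

-- B's inner sweep checks exactly: every remaining subinterval [a, b'] has a unique element
theorem innerB_iff (prev next : List Int) (a r : Int)
    (hG : GoodIdx prev next a r) :
    ∀ (b : Int) (m : Option Int), a + 1 ≤ b → MInv prev next a (b - 1) m →
      (innerB a r prev next b m = true ↔
        ∀ b', b ≤ b' → b' ≤ r →
          ∃ k, a ≤ k ∧ k ≤ b' ∧ pvV prev k < a ∧ b' < nvV next k) := by
  intro b m
  fun_induction innerB a r prev next b m with
  | case1 b m hbr hupd =>
    -- updB returned none: inner returns False; no candidate exists at b' = b
    intro hab hInv
    simp only [Bool.false_eq_true, false_iff]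
    intro hU
    obtain ⟨hp, hn⟩ := hG b (by omega) hbr
    have hInv' := updB_inv prev next a b m hp hn (by omega) hInv
    obtain ⟨k, hk1, hk2, hkc, hkn⟩ := hU b (le_refl _) hbr
    obtain ⟨m0, hm0, _⟩ := hInv'.1 k hk1 hk2 hkc
    rw [hupd] at hm0; exact absurd hm0 (by simp)
  | case2 b m hbr m0 hupd hm0b =>
    -- m0 ≤ b: inner returns False; a candidate for [a, b] would force m0 > b
    intro hab hInv
    simp only [Bool.false_eq_true, false_iff]
    intro hU
    obtain ⟨hp, hn⟩ := hG b (by omega) hbr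
    have hInv' := updB_inv prev next a b m hp hn (by omega) hInv
    obtain ⟨k, hk1, hk2, hkc, hkn⟩ := hU b (le_refl _) hbr
    obtain ⟨m1, hm1, hle⟩ := hInv'.1 k hk1 hk2 hkc
    rw [hupd] at hm1
    simp at hm1
    omega
  | case3 b m hbr m0 hupd hm0b ih =>
    intro hab hInv
    obtain ⟨hp, hn⟩ := hG b (by omega) hbr
    have hInv' := updB_inv prev next a b m hp hn (by omega) hInv
    rw [hupd] at hInv'
    have hInv'' : MInv prev next a (b + 1 - 1) (some m0) := by
      have : b + 1 - 1 = b := by omega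
      rw [this]; exact hInv'
    rw [ih (by omega) hInv'']
    constructor
    · intro h b' hb1 hb2
      by_cases hbb : b' = b
      · subst hbb
        obtain ⟨k, hk1, hk2, hkc, hke⟩ := hInv'.2 m0 rfl
        exact ⟨k, hk1, hk2, hkc, by omega⟩
      · exact h b' (by omega) hb2
    · intro h b' hb1 hb2
      exact h b' (by omega) hb2
  | case4 b m hbr =>
    intro hab hInv
    simp only [true_iff]
    intro b' hb1 hb2; omega

-- B's outer loop checks AllU from a on
theorem outerB_iff (prev next : List Int) (l r : Int)
    (hG : GoodIdx prev next l r) :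
    ∀ (a : Int), l ≤ a →
      (outerB r prev next a = true ↔
        ∀ a' b, a ≤ a' → a' < b → b ≤ r →
          ∃ k, a' ≤ k ∧ k ≤ b ∧ pvV prev k < a' ∧ b < nvV next k) := by
  intro a
  fun_induction outerB r prev next a with
  | case1 a har ih =>
    intro hla
    have hGa : GoodIdx prev next a r := goodIdx_mono prev next l r a r hG hla (le_refl _)
    obtain ⟨hp, hn⟩ := hGa a (le_refl _) (by omega)
    have hInv0 : MInv prev next a (a - 1) (none : Option Int) := by
      constructor
      · intro k hk1 hk2; omega
      · intro m0 hm0; exact absurd hm0 (by simp)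
    have hInvA : MInv prev next a (a + 1 - 1) (updB a prev next none a) := by
      have h := updB_inv prev next a a none hp hn (le_refl _) hInv0
      have he : a + 1 - 1 = a := by omega
      rw [he]; exact h
    have hInner := innerB_iff prev next a r hGa (a + 1) (updB a prev next none a)
      (le_refl _) hInvA
    rw [Bool.and_eq_true, hInner, ih (by omega)]
    constructor
    · rintro ⟨h1, h2⟩ a' b ha1 hab hbr
      by_cases haa : a' = a
      · subst haa; exact h1 b (by omega) hbr
      · exact h2 a' b (by omega) hab hbr
    · intro h
      exact ⟨fun b' hb1 hb2 => h a b' (le_refl _) (by omega) hb2,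
             fun a' b ha1 hab hbr => h a' b (by omega) hab hbr⟩
  | case2 a har =>
    intro hla
    simp only [true_iff]
    intro a' b ha1 hab hbr; omega

-- all indexes of [l, r] are valid when the interval lies within both arrays' index range
theorem bounds_good (prev next : List Int) (l r : Int)
    (h1 : -(min (prev.length : Int) (next.length : Int)) ≤ l)
    (h2 : r < min (prev.length : Int) (next.length : Int)) :
    GoodIdx prev next l r := by
  intro k hk1 hk2
  constructor
  · rw [Option.isSome_iff_ne_none]
    intro hnone
    have := (PySem.List.pyGet?_eq_none_iff _ _).mp hnone
    simp [PySem.Raise.InRange] at this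
    omega
  · rw [Option.isSome_iff_ne_none]
    intro hnone
    have := (PySem.List.pyGet?_eq_none_iff _ _).mp hnone
    simp [PySem.Raise.InRange] at this
    omega

-- ===== VERDICT (by name: the statement is the Claim_ definition above) =====
theorem is_non_boring_spec : Claim_equal_is_non_boring := by
  intro l r prev next _ hPre
  unfold Spec_is_non_boring is_non_boring is_non_boring_alt
  by_cases hlr : l ≥ r
  · rw [nbA, if_pos hlr, outerB, if_neg (by omega)]
  · have hB : -(min (prev.length : Int) (next.length : Int)) ≤ l ∧
        r < min (prev.length : Int) (next.length : Int) := by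
      rcases hPre with h | h
      · omega
      · exact h
    have hG := bounds_good prev next l r hB.1 hB.2
    have hA := nbA_iff prev next ((r - l).toNat + 1) ((r - l).toNat + 1) l r
      (by omega) (by omega) hG
    have hBiff := outerB_iff prev next l r hG l (le_refl _)
    rw [Bool.eq_iff_iff, hA, hBiff]
    exact Iff.rfl
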